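-- pv_equiv track=rewrite | github.com/ahmedhhw/time-control-swift | filter_sessions.py | filter_sessions
-- ===== SOURCE A (Python) =====
-- MIN_DURATION = 30  # seconds
--
-- def filter_sessions(sessions: list[dict]) -> tuple[list[dict], int]:
--     """Return (kept_sessions, removed_count)."""
--     kept = []
--     removed = 0
--     for s in sessions:
--         start = s.get("startedAt")
--         stop = s.get("stoppedAt")
--         if start is None or stop is None:
--             # Keep open/malformed sessions as-is
--             kept.append(s)
--             continue
--         if stop - start >= MIN_DURATION:
--             kept.append(s)
--         else:
--             removed += 1
--     return kept, removed
-- ===== SOURCE B (Python) =====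
-- MIN_DURATION = 30  # seconds
--
-- def filter_sessions(sessions: list[dict]) -> tuple[list[dict], int]:
--     """Return (kept_sessions, removed_count) by divide and conquer."""
--     if not sessions:
--         return [], 0
--     if len(sessions) == 1:
--         s = sessions[0]
--         start = s.get("startedAt")
--         stop = s.get("stoppedAt")
--         if start is None or stop is None or stop - start >= MIN_DURATION:
--             return [s], 0
--         return [], 1
--     mid = len(sessions) // 2
--     kept_l, rem_l = filter_sessions(sessions[:mid])
--     kept_r, rem_r = filter_sessions(sessions[mid:])
--     return kept_l + kept_r, rem_l + rem_r
-- ===== Notes on version B (the rewrite author's own statement) =====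
-- stated objective: alternative
-- what changed: Replaces A's single left-to-right loop carrying (kept, removed) accumulators by a divide-and-conquer recursion: split the list in half, solve each half, concatenate the kept halves and add the removed counts; correctness relies on filtering and counting distributing over list concatenation.
import Mathlib
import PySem

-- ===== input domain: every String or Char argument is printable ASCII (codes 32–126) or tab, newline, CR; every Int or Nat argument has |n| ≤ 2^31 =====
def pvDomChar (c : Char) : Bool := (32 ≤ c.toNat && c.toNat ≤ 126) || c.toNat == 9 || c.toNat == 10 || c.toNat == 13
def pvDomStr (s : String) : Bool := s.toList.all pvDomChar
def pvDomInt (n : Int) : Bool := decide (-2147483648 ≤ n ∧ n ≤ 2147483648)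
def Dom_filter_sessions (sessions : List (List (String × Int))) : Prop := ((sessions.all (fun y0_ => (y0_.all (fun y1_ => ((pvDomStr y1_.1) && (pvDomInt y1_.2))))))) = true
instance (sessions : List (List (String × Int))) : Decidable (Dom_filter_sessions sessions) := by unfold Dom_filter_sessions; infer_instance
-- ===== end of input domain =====

-- B replaces A's single accumulator loop by a divide-and-conquer recursion: split in half,
-- solve each half, concatenate kept lists and add removed counts (objective: alternative).

-- ===== PORT A =====
-- transliteration of A: one loop carrying (kept, removed)
def filter_sessions (sessions : List (List (String × Int))) : (List (List (String × Int))) × Int :=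
  sessions.foldl (fun st s =>
    let start := (PySem.Dict.mk s).get? "startedAt"
    let stop := (PySem.Dict.mk s).get? "stoppedAt"
    match start, stop with
    | some a, some b =>
        if b - a ≥ 30 then (st.1 ++ [s], st.2) else (st.1, st.2 + 1)
    | _, _ => (st.1 ++ [s], st.2)) ([], 0)

-- ===== PORT B =====
-- divide and conquer, as in Source B: base cases for [] and [s], then split at len//2
def filter_sessions_alt (sessions : List (List (String × Int))) : (List (List (String × Int))) × Int :=
  match sessions with
  | [] => ([], 0)
  | [s] =>
    -- Source B: if start is None or stop is None or stop - start >= MIN_DURATION (short-circuit or)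
    match (PySem.Dict.mk s).get? "startedAt" with
    | none => ([s], 0)
    | some a =>
      match (PySem.Dict.mk s).get? "stoppedAt" with
      | none => ([s], 0)
      | some b => if b - a ≥ 30 then ([s], 0) else ([], 1)
  | a :: b :: rest =>
    let l := a :: b :: rest
    let mid := l.length / 2
    let left := filter_sessions_alt (l.take mid)
    let right := filter_sessions_alt (l.drop mid)
    (left.1 ++ right.1, left.2 + right.2)
  termination_by sessions.length
  decreasing_by
    · simp [List.length_take]; omega
    · simp [List.length_drop]; omega

-- ===== PRECONDITION & SPEC =====
def Spec_filter_sessions (sessions : List (List (String × Int))) (out : (List (List (String × Int))) × Int) : Prop := out = filter_sessions_alt sessions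
instance (sessions : List (List (String × Int))) (out : (List (List (String × Int))) × Int) : Decidable (Spec_filter_sessions sessions out) := by unfold Spec_filter_sessions; infer_instance

-- ===== CLAIM (what is proved, stated in full; the proofs are below) =====
def Claim_equal_filter_sessions : Prop := ∀ (sessions : List (List (String × Int))), Dom_filter_sessions sessions → Spec_filter_sessions sessions (filter_sessions sessions)

-- ===== LEMMAS AND PROOFS =====

-- the keep predicate both programs decide per session
def keepSession (s : List (String × Int)) : Bool :=
  match (PySem.Dict.mk s).get? "startedAt", (PySem.Dict.mk s).get? "stoppedAt" with
  | some a, some b => decide (b - a ≥ 30)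
  | _, _ => true

-- closed characterisation of B: filtered list and count of dropped elements
theorem filter_sessions_alt_eq (l : List (List (String × Int))) :
    filter_sessions_alt l
      = (l.filter keepSession, ((l.countP (fun s => ! keepSession s)) : Int)) := by
  fun_induction filter_sessions_alt l with
  | case1 => rfl
  | case2 s hA =>
    have hA' : (PySem.Dict.mk s).get? "startedAt" = none := hA
    simp [keepSession, hA', List.filter, List.countP, List.countP.go]
  | case3 s a hA hB =>
    have hA' : (PySem.Dict.mk s).get? "startedAt" = some a := hA
    have hB' : (PySem.Dict.mk s).get? "stoppedAt" = none := hB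
    simp [keepSession, hA', hB', List.filter, List.countP, List.countP.go]
  | case4 s a hA b hB h =>
    have hA' : (PySem.Dict.mk s).get? "startedAt" = some a := hA
    have hB' : (PySem.Dict.mk s).get? "stoppedAt" = some b := hB
    simp [keepSession, hA', hB', ge_iff_le.mp h, List.filter, List.countP, List.countP.go]
  | case5 s a hA b hB h =>
    have hA' : (PySem.Dict.mk s).get? "startedAt" = some a := hA
    have hB' : (PySem.Dict.mk s).get? "stoppedAt" = some b := hB
    rw [ge_iff_le] at h
    simp [keepSession, hA', hB', decide_eq_false h, List.filter, List.countP, List.countP.go]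
  | case6 a b rest l mid left right ih1 ih2 =>
    simp only [left, right, ih1, ih2]
    have hsplit : List.take mid l ++ List.drop mid l = a :: b :: rest :=
      List.take_append_drop mid l
    rw [Prod.mk.injEq]
    refine ⟨?_, ?_⟩
    · rw [← List.filter_append, hsplit]
    · rw [← Nat.cast_add, ← List.countP_append, hsplit]

-- loop invariant for A's fold
theorem filter_sessions_foldl_inv (l : List (List (String × Int)))
    (k : List (List (String × Int))) (r : Int) :
    l.foldl (fun st s =>
      let start := (PySem.Dict.mk s).get? "startedAt"
      let stop := (PySem.Dict.mk s).get? "stoppedAt"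
      match start, stop with
      | some a, some b =>
          if b - a ≥ 30 then (st.1 ++ [s], st.2) else (st.1, st.2 + 1)
      | _, _ => (st.1 ++ [s], st.2)) (k, r)
    = (k ++ l.filter keepSession, r + ((l.countP (fun s => ! keepSession s)) : Int)) := by
  induction l generalizing k r with
  | nil => simp
  | cons s t ih =>
    rcases hA : (PySem.Dict.mk s).get? "startedAt" with _ | a <;>
    rcases hB : (PySem.Dict.mk s).get? "stoppedAt" with _ | b
    · simp [List.foldl_cons, keepSession, hA, hB, ih]
    · simp [List.foldl_cons, keepSession, hA, hB, ih]
    · simp [List.foldl_cons, keepSession, hA, hB, ih]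
    · by_cases h : (30 : Int) ≤ b - a
      · simp [List.foldl_cons, keepSession, hA, hB, ih, h, ge_iff_le]
      · simp [List.foldl_cons, keepSession, hA, hB, ih, h, ge_iff_le]
        ring

-- ===== VERDICT (by name: the statement is the Claim_ definition above) =====
theorem filter_sessions_spec : Claim_equal_filter_sessions := by
  intro sessions _
  show _ = _
  rw [filter_sessions_alt_eq]
  unfold filter_sessions
  rw [filter_sessions_foldl_inv]
  simp
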